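-- pv_equiv track=rewrite | github.com/zenot11/telegram-ai-bot-_- | telegram_bot/services/compare.py | get_unique_subjects
-- ===== SOURCE A (Python) =====
-- from typing import Any
--
-- def get_common_subjects(items: list[dict[str, Any]]) -> list[str]:
--     subject_sets = [_subject_set(item) for item in items]
--     subject_sets = [subjects for subjects in subject_sets if subjects]
--     if len(subject_sets) < 2:
--         return []
--     return sorted(set.intersection(*subject_sets))
--
-- def get_unique_subjects(items: list[dict[str, Any]]) -> list[str]:
--     subject_sets = [_subject_set(item) for item in items]
--     subject_sets = [subjects for subjects in subject_sets if subjects]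
--     if len(subject_sets) < 2:
--         return []
--
--     common = set(get_common_subjects(items))
--     all_subjects = set.union(*subject_sets)
--     return sorted(all_subjects - common)
--
-- def _subject_set(item: dict[str, Any]) -> set[str]:
--     subjects = item.get("subjects")
--     if not isinstance(subjects, list):
--         return set()
--     return {str(subject).strip().lower() for subject in subjects if str(subject).strip()}
-- ===== SOURCE B (Python) =====
-- def _subject_set(item):
--     subjects = item.get("subjects")
--     if not isinstance(subjects, list):
--         return set()
--     return {str(subject).strip().lower() for subject in subjects if str(subject).strip()}
--
--
-- def get_unique_subjects(items):
--     sets = [s for s in (_subject_set(item) for item in items) if s]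
--     n = len(sets)
--     if n < 2:
--         return []
--     counts = {}
--     for s in sets:
--         for subject in s:
--             counts[subject] = counts.get(subject, 0) + 1
--     return sorted(subject for subject, count in counts.items() if count < n)
-- ===== Notes on version B (the rewrite author's own statement) =====
-- stated objective: simpler
-- what changed: Replaces the set.union/set.intersection reductions (and the call back into get_common_subjects, which redoes the normalization) with one counting pass over the non-empty subject sets plus a count<n threshold filter: union-minus-intersection is exactly the subjects missing from at least one set.
import Mathlib
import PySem

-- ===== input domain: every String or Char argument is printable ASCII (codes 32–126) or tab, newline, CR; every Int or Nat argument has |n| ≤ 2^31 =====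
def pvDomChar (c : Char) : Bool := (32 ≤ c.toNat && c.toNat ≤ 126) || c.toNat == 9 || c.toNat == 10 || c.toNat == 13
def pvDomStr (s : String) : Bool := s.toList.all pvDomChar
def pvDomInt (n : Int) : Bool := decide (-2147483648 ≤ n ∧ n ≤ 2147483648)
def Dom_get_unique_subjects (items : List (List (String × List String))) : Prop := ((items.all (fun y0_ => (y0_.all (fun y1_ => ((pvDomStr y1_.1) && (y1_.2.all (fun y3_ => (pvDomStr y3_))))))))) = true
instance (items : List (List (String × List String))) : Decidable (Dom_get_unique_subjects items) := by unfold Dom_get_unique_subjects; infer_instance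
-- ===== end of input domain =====

-- B replaces A's union/intersection set reductions by a single counting pass over the
-- subject sets plus a threshold filter (objective: simpler / alternative).


-- ===== PORT A =====
-- _subject_set: item.get("subjects"); if not a list → empty set (under the type convention the
-- value is always a list when present, so the isinstance branch fires only for a missing key);
-- then the set comprehension {str(s).strip().lower() for s in subjects if str(s).strip()}.
def subjectSet (item : List (String × List String)) : PySem.Set String :=
  match (PySem.Dict.mk item).get? "subjects" with
  | none => PySem.Set.empty
  | some subs =>
      PySem.Set.ofList
        ((subs.filter (fun s => !(PySem.Str.strip s == ""))).map
          (fun s => PySem.Str.lower (PySem.Str.strip s)))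

def get_common_subjects (items : List (List (String × List String))) : List String :=
  let subject_sets := items.map subjectSet
  let subject_sets := subject_sets.filter (fun s => !s.isEmpty)
  if subject_sets.length < 2 then []
  else
    match subject_sets with
    | [] => []  -- unreachable: length ≥ 2
    | s0 :: rest => PySem.List.sorted (rest.foldl PySem.Set.inter s0) (fun x => x)

def get_unique_subjects (items : List (List (String × List String))) : List String :=
  let subject_sets := items.map subjectSet
  let subject_sets := subject_sets.filter (fun s => !s.isEmpty)
  if subject_sets.length < 2 then []
  else
    let common := PySem.Set.ofList (get_common_subjects items)
    match subject_sets with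
    | [] => []  -- unreachable: length ≥ 2
    | s0 :: rest =>
        let all_subjects := rest.foldl PySem.Set.union s0
        PySem.List.sorted (all_subjects.diff common) (fun x => x)

-- ===== PORT B =====
def get_unique_subjects_alt (items : List (List (String × List String))) : List String :=
  let sets := (items.map subjectSet).filter (fun s => !s.isEmpty)
  let n := sets.length
  if n < 2 then []
  else
    let counts : PySem.Dict String Int :=
      sets.foldl (fun d s => s.foldl (fun d x => d.modify x 0 (· + 1)) d) PySem.Dict.empty
    PySem.List.sorted
      ((counts.items.filter (fun p => p.2 < (n : Int))).map (fun p => p.1)) (fun x => x)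

-- ===== PRECONDITION & SPEC =====
def Spec_get_unique_subjects (items : List (List (String × List String))) (out : List String) : Prop := out = get_unique_subjects_alt items
instance (items : List (List (String × List String))) (out : List String) : Decidable (Spec_get_unique_subjects items out) := by unfold Spec_get_unique_subjects; infer_instance

-- ===== CLAIM (what is proved, stated in full; the proofs are below) =====
def Claim_equal_get_unique_subjects : Prop := ∀ (items : List (List (String × List String))), Dom_get_unique_subjects items → Spec_get_unique_subjects items (get_unique_subjects items)

-- ===== LEMMAS AND PROOFS =====

-- membership in the folded union: some set of s0 :: rest contains x
theorem mem_foldl_union {s0 : PySem.Set String} {rest : List (PySem.Set String)} {x : String} :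
    x ∈ rest.foldl PySem.Set.union s0 ↔ ∃ t ∈ s0 :: rest, x ∈ t := by
  induction rest generalizing s0 with
  | nil => simp
  | cons t ts ih =>
      rw [List.foldl_cons, ih]
      simp only [List.mem_cons]
      constructor
      · rintro ⟨u, hu | hu, hx⟩
        · subst hu
          rcases (PySem.Set.mem_union _ _ _).1 hx with hx | hx
          · exact ⟨s0, Or.inl rfl, hx⟩
          · exact ⟨t, Or.inr (Or.inl rfl), hx⟩
        · exact ⟨u, Or.inr (Or.inr hu), hx⟩
      · rintro ⟨u, hu | hu | hu, hx⟩
        · exact ⟨PySem.Set.union s0 t, Or.inl rfl, (PySem.Set.mem_union _ _ _).2 (Or.inl (hu ▸ hx))⟩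
        · exact ⟨PySem.Set.union s0 t, Or.inl rfl, (PySem.Set.mem_union _ _ _).2 (Or.inr (hu ▸ hx))⟩
        · exact ⟨u, Or.inr hu, hx⟩

theorem nodup_foldl_union {s0 : PySem.Set String} {rest : List (PySem.Set String)}
    (h : s0.Nodup) : (rest.foldl PySem.Set.union s0).Nodup := by
  induction rest generalizing s0 with
  | nil => exact h
  | cons t ts ih => exact ih (PySem.Set.nodup_union _ _ h)

theorem mem_foldl_inter {s0 : PySem.Set String} {rest : List (PySem.Set String)} {x : String} :
    x ∈ rest.foldl PySem.Set.inter s0 ↔ ∀ t ∈ s0 :: rest, x ∈ t := by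
  induction rest generalizing s0 with
  | nil => simp
  | cons t ts ih =>
      rw [List.foldl_cons, ih]
      simp only [List.mem_cons]
      constructor
      · rintro h u (hu | hu | hu)
        · exact hu ▸ ((PySem.Set.mem_inter _ _ _).1 (h _ (Or.inl rfl))).1
        · exact hu ▸ ((PySem.Set.mem_inter _ _ _).1 (h _ (Or.inl rfl))).2
        · exact h u (Or.inr hu)
      · rintro h u (hu | hu)
        · exact hu ▸ (PySem.Set.mem_inter _ _ _).2 ⟨h s0 (Or.inl rfl), h t (Or.inr (Or.inl rfl))⟩
        · exact h u (Or.inr (Or.inr hu))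

-- each filtered subject set is Nodup (built by Set.ofList)
theorem nodup_of_mem_filtered {items : List (List (String × List String))}
    {s : PySem.Set String}
    (h : s ∈ (items.map subjectSet).filter (fun s => !s.isEmpty)) : s.Nodup := by
  have h' := List.mem_of_mem_filter h
  rcases List.mem_map.1 h' with ⟨item, _, rfl⟩
  unfold subjectSet
  cases (PySem.Dict.mk item).get? "subjects" with
  | none => exact List.nodup_nil
  | some subs => exact PySem.Set.nodup_ofList _

-- in a list of Nodup sets, the total occurrence count of x equals the number of sets containing x
theorem count_flatten_eq_countP {F : List (PySem.Set String)} {x : String}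
    (h : ∀ s ∈ F, s.Nodup) :
    (F.flatten.count x) = F.countP (fun s => decide (x ∈ s)) := by
  induction F with
  | nil => simp
  | cons s ts ih =>
      simp only [List.flatten_cons, List.count_append, List.countP_cons]
      rw [ih (fun t ht => h t (by simp [ht]))]
      by_cases hx : x ∈ s
      · rw [List.count_eq_one_of_mem (h s (by simp)) hx, if_pos (by simpa using hx)]
        omega
      · rw [List.count_eq_zero.2 hx, if_neg (by simpa using hx)]
        omega

-- B's filtered key list, explicitly
theorem alt_list_eq {F : List (PySem.Set String)} :
    (((PySem.Dict.counter F.flatten).items.filter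
        (fun p => p.2 < (F.length : Int))).map (fun p => p.1))
      = (PySem.Set.ofList F.flatten).filter
          (fun k => decide ((F.flatten.count k : Int) < (F.length : Int))) := by
  rw [PySem.Dict.items_counter, List.filter_map, List.map_map]
  simp [Function.comp_def]

-- the two unordered result lists are permutations of each other
theorem core_perm (items : List (List (String × List String)))
    (s0 : PySem.Set String) (rest : List (PySem.Set String))
    (hF : (items.map subjectSet).filter (fun s => !s.isEmpty) = s0 :: rest)
    (hlen : ¬ (s0 :: rest).length < 2) :
    ((rest.foldl PySem.Set.union s0).diff
        (PySem.Set.ofList (get_common_subjects items))).Perm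
      ((((PySem.Dict.counter (s0 :: rest).flatten).items.filter
          (fun p => p.2 < ((s0 :: rest).length : Int))).map (fun p => p.1))) := by
  rw [alt_list_eq]
  have hnodupF : ∀ s ∈ (s0 :: rest), s.Nodup := by
    intro s hs
    exact nodup_of_mem_filtered (items := items) (hF ▸ hs)
  have hA : ((rest.foldl PySem.Set.union s0).diff
      (PySem.Set.ofList (get_common_subjects items))).Nodup :=
    PySem.Set.nodup_diff _ _ (nodup_foldl_union (hnodupF s0 (by simp)))
  have hB : ((PySem.Set.ofList (s0 :: rest).flatten).filter
      (fun k => decide (((s0 :: rest).flatten.count k : Int) < (((s0 :: rest).length : Nat) : Int)))).Nodup :=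
    (PySem.Set.nodup_ofList _).filter _
  refine (List.perm_ext_iff_of_nodup hA hB).2 ?_
  intro x
  rw [PySem.Set.mem_diff, mem_foldl_union, List.mem_filter]
  simp only [PySem.Set.mem_ofList, List.mem_flatten, decide_eq_true_iff]
  have hcount : ((s0 :: rest).flatten.count x) = (s0 :: rest).countP (fun s => decide (x ∈ s)) :=
    count_flatten_eq_countP hnodupF
  have hcommon : x ∈ get_common_subjects items ↔ ∀ t ∈ s0 :: rest, x ∈ t := by
    unfold get_common_subjects
    simp only [hF]
    rw [if_neg hlen, PySem.List.mem_sorted, mem_foldl_inter]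
  rw [hcommon]
  constructor
  · rintro ⟨⟨t, ht, hxt⟩, hnot⟩
    push Not at hnot
    obtain ⟨u, hu, hxu⟩ := hnot
    refine ⟨⟨t, ht, hxt⟩, ?_⟩
    have h1 : (s0 :: rest).countP (fun s => decide (x ∈ s)) < (s0 :: rest).length :=
      lt_of_le_of_ne List.countP_le_length
        (fun heq => hxu (by simpa using List.countP_eq_length.1 heq u hu))
    rw [hcount]
    exact_mod_cast h1
  · rintro ⟨⟨t, ht, hxt⟩, hlt⟩
    refine ⟨⟨t, ht, hxt⟩, ?_⟩
    intro hall
    have hfull : (s0 :: rest).countP (fun s => decide (x ∈ s)) = (s0 :: rest).length :=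
      List.countP_eq_length.2 (fun u hu => by simpa using hall u hu)
    rw [hcount, hfull] at hlt
    omega

-- ===== VERDICT (by name: the statement is the Claim_ definition above) =====
theorem get_unique_subjects_spec : Claim_equal_get_unique_subjects := by
  intro items _
  unfold Spec_get_unique_subjects
  unfold get_unique_subjects get_unique_subjects_alt
  cases hF : (items.map subjectSet).filter (fun s => !s.isEmpty) with
  | nil => simp [hF]
  | cons s0 rest =>
      by_cases hlen : (s0 :: rest).length < 2
      · simp only [hF]
        rw [if_pos hlen, if_pos hlen]
      · have hc : (s0 :: rest).foldl
            (fun d s => s.foldl (fun d x => PySem.Dict.modify d x 0 (· + 1)) d) PySem.Dict.empty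
            = PySem.Dict.counter (s0 :: rest).flatten := by
          rw [PySem.Dict.counter_eq_foldl, List.foldl_flatten]
        simp only [hF]
        rw [if_neg hlen, if_neg hlen]
        simp only [hc]
        exact PySem.List.sorted_eq_sorted_of_perm _ _ _ (fun a b h => h)
          (core_perm items s0 rest hF hlen)
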